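-- pv_equiv track=rewrite | github.com/Mauro-1998/ia-uncuyo-2021 | tp6-csp/code/main.py | generarPosiciones
-- ===== SOURCE A (Python) =====
-- def generarPosiciones(tablero):
--   posiciones = [[i for i in range(1,len(tablero)+1)] for r in range(0,len(tablero))]
--   if([] in posiciones):
--     return posiciones
--   else:
--     for i in range(0,len(tablero)):
--       row = tablero[i]
--       col = i+1
--
--       # Eliminamos filas
--       for o in range(col,len(posiciones)):
--         if(row in posiciones[o]):
--           posiciones[o].remove(row)
--
--       # Eliminamos diagonales descendentes
--       contador = 1
--       while(row+contador <= len(tablero) and col+contador <= len(tablero)):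
--         if(row+contador in posiciones[col+contador-1]):
--           posiciones[col+contador-1].remove(row+contador)
--         contador += 1
--
--        # Eliminamos las diagonales ascendentes
--       contador = 1
--       while(row-contador >= 0 and col+contador <= len(tablero)):
--         if(row-contador in posiciones[col+contador-1]):
--           posiciones[col+contador-1].remove(row-contador)
--         contador += 1
--
--   return posiciones
-- ===== SOURCE B (Python) =====
-- def generarPosiciones(tablero):
--     n = len(tablero)
--     res = []
--     for j in range(n):
--         forbidden = set()
--         for i in range(j):
--             d = j - i
--             v = tablero[i]
--             forbidden.update((v, v + d, v - d))
--         res.append([v for v in range(1, n + 1) if v not in forbidden])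
--     return res
-- ===== Notes on version B (the rewrite author's own statement) =====
-- stated objective: faster
-- what changed: Flipped the nesting: instead of mutating every later column's list per queen (membership test + list.remove, plus incremental while-loops walking the diagonals), B computes for each target column a forbidden set from all earlier queens with closed-form diagonal arithmetic and builds the column by one filtered range pass.
import Mathlib
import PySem

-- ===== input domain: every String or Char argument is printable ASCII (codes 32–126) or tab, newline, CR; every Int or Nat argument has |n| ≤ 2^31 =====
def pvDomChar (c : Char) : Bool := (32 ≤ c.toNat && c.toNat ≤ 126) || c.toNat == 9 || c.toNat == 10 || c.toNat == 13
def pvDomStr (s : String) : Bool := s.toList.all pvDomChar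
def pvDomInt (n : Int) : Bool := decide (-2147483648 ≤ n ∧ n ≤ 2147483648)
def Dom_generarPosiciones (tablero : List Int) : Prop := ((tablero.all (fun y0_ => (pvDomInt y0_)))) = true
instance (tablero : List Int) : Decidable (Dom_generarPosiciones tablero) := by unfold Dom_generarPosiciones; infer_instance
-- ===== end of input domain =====

-- B replaces A's per-queen mutation of later columns (list.remove + incremental diagonal
-- while-loops) by a per-column forbidden set with closed-form diagonal arithmetic (faster per
-- a timing run: it removes the linear remove/membership scans inside the inner loops).

-- ===== PORT A =====

-- `if row in posiciones[o]: posiciones[o].remove(row)`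
def pvRemoveIfMem (l : List Int) (x : Int) : List Int :=
  if x ∈ l then (PySem.List.remove? l x).getD l else l

-- `posiciones[j] = <posiciones[j] with x removed as above>`; indices used are always in range
def pvModCol (ps : List (List Int)) (j : Nat) (x : Int) : List (List Int) :=
  ps.modify j (fun l => pvRemoveIfMem l x)

-- `while(row+contador <= len(tablero) and col+contador <= len(tablero)): …`
-- (fuel is only the structural termination bound: the loop body runs while `col+contador <= n`,
-- so `fuel = n + 1 - (col + contador)` never reaches 0 while the guard holds)
def pvDescLoop (n : Nat) (row : Int) (col : Nat) : Nat → Nat → List (List Int) → List (List Int)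
  | fuel + 1, contador, ps =>
    if row + contador ≤ (n : Int) ∧ col + contador ≤ n then
      pvDescLoop n row col fuel (contador + 1) (pvModCol ps (col + contador - 1) (row + contador))
    else ps
  | 0, _, ps => ps

-- `while(row-contador >= 0 and col+contador <= len(tablero)): …`  (same fuel scheme)
def pvAscLoop (n : Nat) (row : Int) (col : Nat) : Nat → Nat → List (List Int) → List (List Int)
  | fuel + 1, contador, ps =>
    if 0 ≤ row - contador ∧ col + contador ≤ n then
      pvAscLoop n row col fuel (contador + 1) (pvModCol ps (col + contador - 1) (row - contador))
    else ps
  | 0, _, ps => ps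

def generarPosiciones (tablero : List Int) : List (List Int) :=
  let n := tablero.length
  let posiciones := (List.range n).map (fun _ => PySem.List.pyRange 1 ((n : Int) + 1) 1)
  if [] ∈ posiciones then posiciones
  else
    (List.range n).foldl (fun ps (i : Nat) =>
      let row := PySem.List.pyGetD tablero (i : Int) 0   -- tablero[i], i always in range
      let col : Nat := i + 1
      let ps1 := (List.range' col (n - col)).foldl (fun ps o => pvModCol ps o row) ps
      let ps2 := pvDescLoop n row col (n + 1 - (col + 1)) 1 ps1
      pvAscLoop n row col (n + 1 - (col + 1)) 1 ps2) posiciones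

-- ===== PORT B =====
def generarPosiciones_alt (tablero : List Int) : List (List Int) :=
  let n := tablero.length
  (List.range n).map (fun j =>
    let forbidden := (List.range j).foldl (fun s (i : Nat) =>
      let d : Int := (j : Int) - (i : Int)
      let v := PySem.List.pyGetD tablero (i : Int) 0    -- tablero[i], i always in range
      PySem.Set.add (PySem.Set.add (PySem.Set.add s v) (v + d)) (v - d)) PySem.Set.empty
    (PySem.List.pyRange 1 ((n : Int) + 1) 1).filter (fun v => !(PySem.Set.contains forbidden v)))

-- ===== PRECONDITION & SPEC =====
def Spec_generarPosiciones (tablero : List Int) (out : List (List Int)) : Prop := out = generarPosiciones_alt tablero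
instance (tablero : List Int) (out : List (List Int)) : Decidable (Spec_generarPosiciones tablero out) := by unfold Spec_generarPosiciones; infer_instance

-- ===== CLAIM (what is proved, stated in full; the proofs are below) =====
def Claim_equal_generarPosiciones : Prop := ∀ (tablero : List Int), Dom_generarPosiciones tablero → Spec_generarPosiciones tablero (generarPosiciones tablero)

-- ===== LEMMAS AND PROOFS =====

-- proof-side helpers: every intermediate state of A is "each column j is [1..n] filtered by a predicate"

def pvBase (n : Nat) : List Int := PySem.List.pyRange 1 ((n : Int) + 1) 1

def pvConc (n : Nat) (P : Nat → Int → Bool) : List (List Int) :=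
  (List.range n).map (fun j => (pvBase n).filter (fun v => P j v))

lemma pvBase_nodup (n : Nat) : (pvBase n).Nodup := PySem.List.nodup_pyRange_one 1 ((n : Int) + 1)

lemma pvConc_congr {n : Nat} {P Q : Nat → Int → Bool}
    (h : ∀ j, j < n → ∀ v : Int, 1 ≤ v → v ≤ (n : Int) → P j v = Q j v) :
    pvConc n P = pvConc n Q := by
  unfold pvConc
  refine List.map_congr_left ?_
  intro j hj
  refine List.filter_congr ?_
  intro v hv
  rcases PySem.List.mem_pyRange_one.1 hv with ⟨h1, h2⟩
  exact h j (List.mem_range.1 hj) v h1 (by omega)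

lemma pvRemoveIfMem_eq_filter {l : List Int} (x : Int) (h : l.Nodup) :
    pvRemoveIfMem l x = l.filter (fun v => v != x) := by
  unfold pvRemoveIfMem
  by_cases hx : x ∈ l
  · rw [if_pos hx, PySem.List.remove?_eq_some_erase l x hx, Option.getD_some,
      List.Nodup.erase_eq_filter h]
  · rw [if_neg hx, Eq.comm]
    refine List.filter_eq_self.2 ?_
    intro v hv
    simp only [bne_iff_ne, ne_eq]
    rintro rfl; exact hx hv

lemma pvModCol_conc {n : Nat} {P : Nat → Int → Bool} {j : Nat} {x : Int} (hj : j < n) :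
    pvModCol (pvConc n P) j x =
      pvConc n (fun j' v => if j' = j then (v != x) && P j' v else P j' v) := by
  unfold pvModCol pvConc
  refine List.ext_getElem? ?_
  intro k
  rw [List.getElem?_modify]
  by_cases hk : k < n
  · simp only [List.getElem?_map, List.getElem?_range hk, Option.map_eq_map, Option.map_some]
    congr 1
    by_cases hkj : j = k
    · subst hkj
      rw [pvRemoveIfMem_eq_filter x ((pvBase_nodup n).filter _), List.filter_filter]
      simp only [if_true]
    · have h2 : ¬ k = j := fun h => hkj h.symm
      simp only [if_neg hkj, if_neg h2]
  · have hk' : n ≤ k := by omega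
    simp [hk']

lemma pvRowLemma {n : Nat} (r : Int) :
    ∀ (m a : Nat) (P : Nat → Int → Bool), a + m ≤ n →
      (List.range' a m).foldl (fun ps o => pvModCol ps o r) (pvConc n P) =
        pvConc n (fun j v => if a ≤ j ∧ j < a + m then (v != r) && P j v else P j v) := by
  intro m
  induction m with
  | zero =>
    intro a P _
    simp only [List.range'_zero, List.foldl_nil]
    refine pvConc_congr ?_
    intro j hj v _ _
    rw [if_neg (by omega)]
  | succ m ih =>
    intro a P ha
    rw [List.range'_succ, List.foldl_cons, pvModCol_conc (by omega),
      ih (a + 1) _ (by omega)]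
    refine pvConc_congr ?_
    intro j hj v _ _
    by_cases hja : j = a
    · subst hja
      rw [if_neg (by omega), if_pos rfl, if_pos (by omega)]
    · simp only [if_neg hja]
      by_cases hin : a + 1 ≤ j ∧ j < a + 1 + m
      · rw [if_pos hin, if_pos (by omega)]
      · rw [if_neg hin, if_neg (by omega)]

lemma pvDescLemma {n : Nat} (r : Int) (col : Nat) (hcol : 1 ≤ col) :
    ∀ (fuel c : Nat) (P : Nat → Int → Bool), fuel = n + 1 - (col + c) → 1 ≤ c →
      pvDescLoop n r col fuel c (pvConc n P) =
        pvConc n (fun j v =>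
          if col + c - 1 ≤ j ∧ j < n ∧ r + ((j : Int) + 1 - col) ≤ n then
            (v != r + ((j : Int) + 1 - col)) && P j v
          else P j v) := by
  intro fuel
  induction fuel with
  | zero =>
    intro c P hfuel hc
    rw [pvDescLoop]
    refine pvConc_congr ?_
    intro j hj v _ _
    rw [if_neg (by omega)]
  | succ fuel ih =>
    intro c P hfuel hc
    rw [pvDescLoop]
    by_cases h : r + c ≤ (n : Int) ∧ col + c ≤ n
    · rw [if_pos h, pvModCol_conc (by omega),
        ih (c + 1) _ (by omega) (by omega)]
      refine pvConc_congr ?_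
      intro j hj v _ _
      by_cases hja : j = col + c - 1
      · subst hja
        have hd : ((col + c - 1 : Nat) : Int) + 1 - col = (c : Int) := by
          push_cast [Nat.cast_sub (by omega : 1 ≤ col + c)]; ring
        rw [if_neg (by omega), if_pos rfl, if_pos (by constructor; omega; rw [hd]; omega), hd]
      · simp only [if_neg hja]
        by_cases hin : col + (c + 1) - 1 ≤ j ∧ j < n ∧ r + ((j : Int) + 1 - col) ≤ n
        · rw [if_pos hin, if_pos (by omega)]
        · rw [if_neg hin, if_neg (by omega)]
    · rw [if_neg h]
      refine pvConc_congr ?_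
      intro j hj v _ _
      rw [if_neg ?_]
      rintro ⟨h1, h2, h3⟩
      omega

lemma pvAscLemma {n : Nat} (r : Int) (col : Nat) (hcol : 1 ≤ col) :
    ∀ (fuel c : Nat) (P : Nat → Int → Bool), fuel = n + 1 - (col + c) → 1 ≤ c →
      pvAscLoop n r col fuel c (pvConc n P) =
        pvConc n (fun j v =>
          if col + c - 1 ≤ j ∧ j < n ∧ 0 ≤ r - ((j : Int) + 1 - col) then
            (v != r - ((j : Int) + 1 - col)) && P j v
          else P j v) := by
  intro fuel
  induction fuel with
  | zero =>
    intro c P hfuel hc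
    rw [pvAscLoop]
    refine pvConc_congr ?_
    intro j hj v _ _
    rw [if_neg (by omega)]
  | succ fuel ih =>
    intro c P hfuel hc
    rw [pvAscLoop]
    by_cases h : 0 ≤ r - c ∧ col + c ≤ n
    · rw [if_pos h, pvModCol_conc (by omega),
        ih (c + 1) _ (by omega) (by omega)]
      refine pvConc_congr ?_
      intro j hj v _ _
      by_cases hja : j = col + c - 1
      · subst hja
        have hd : ((col + c - 1 : Nat) : Int) + 1 - col = (c : Int) := by
          push_cast [Nat.cast_sub (by omega : 1 ≤ col + c)]; ring
        rw [if_neg (by omega), if_pos rfl, if_pos (by constructor; omega; rw [hd]; omega), hd]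
      · simp only [if_neg hja]
        by_cases hin : col + (c + 1) - 1 ≤ j ∧ j < n ∧ 0 ≤ r - ((j : Int) + 1 - col)
        · rw [if_pos hin, if_pos (by omega)]
        · rw [if_neg hin, if_neg (by omega)]
    · rw [if_neg h]
      refine pvConc_congr ?_
      intro j hj v _ _
      rw [if_neg ?_]
      rintro ⟨h1, h2, h3⟩
      omega


-- the accumulated predicate after processing queens 0..k-1 (guards exactly as A applies them)
def pvOK (t : List Int) (i j : Nat) (v : Int) : Bool :=
  (if i + 1 ≤ j then v != t.getD i 0 else true) &&
  ((if i + 1 ≤ j ∧ j < t.length ∧ t.getD i 0 + ((j : Int) - i) ≤ (t.length : Int) then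
      v != t.getD i 0 + ((j : Int) - i) else true) &&
   (if i + 1 ≤ j ∧ j < t.length ∧ 0 ≤ t.getD i 0 - ((j : Int) - i) then
      v != t.getD i 0 - ((j : Int) - i) else true))

def pvAll (t : List Int) (k j : Nat) (v : Int) : Bool :=
  (List.range k).all (fun i => pvOK t i j v)

lemma pvOuter (t : List Int) :
    ∀ k, k ≤ t.length →
      (List.range k).foldl (fun ps (i : Nat) =>
          pvAscLoop t.length (PySem.List.pyGetD t (i : Int) 0) (i + 1) (t.length + 1 - ((i + 1) + 1)) 1
            (pvDescLoop t.length (PySem.List.pyGetD t (i : Int) 0) (i + 1) (t.length + 1 - ((i + 1) + 1)) 1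
              ((List.range' (i + 1) (t.length - (i + 1))).foldl
                (fun ps o => pvModCol ps o (PySem.List.pyGetD t (i : Int) 0)) ps)))
        (pvConc t.length (fun _ _ => true)) =
      pvConc t.length (pvAll t k) := by
  intro k
  induction k with
  | zero =>
    intro _
    rw [List.range_zero, List.foldl_nil]
    refine pvConc_congr ?_
    intro j hj v _ _
    simp [pvAll]
  | succ k ih =>
    intro hk
    rw [List.range_succ, List.foldl_append, ih (by omega), List.foldl_cons, List.foldl_nil]
    have hrow : PySem.List.pyGetD t ((k : Nat) : Int) 0 = t.getD k 0 := by
      simp [PySem.List.pyGetD_natCast]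
    rw [hrow]
    rw [pvRowLemma (t.getD k 0) (t.length - (k + 1)) (k + 1) _ (by omega)]
    rw [pvDescLemma (t.getD k 0) (k + 1) (by omega)
      (t.length + 1 - ((k + 1) + 1)) 1 _ (by omega) (le_refl 1)]
    rw [pvAscLemma (t.getD k 0) (k + 1) (by omega)
      (t.length + 1 - ((k + 1) + 1)) 1 _ (by omega) (le_refl 1)]
    refine pvConc_congr ?_
    intro j hj v _ _
    have hd : (j : Int) + 1 - ((k + 1 : Nat) : Int) = (j : Int) - k := by push_cast; ring
    rw [hd]
    have hall : pvAll t (k + 1) j v = (pvAll t k j v && pvOK t k j v) := by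
      simp [pvAll, List.range_succ]
    rw [hall]
    unfold pvOK
    split_ifs <;>
      first
        | rfl
        | (exfalso; omega)
        | (cases pvAll t k j v <;> cases v != t.getD k 0 <;>
            cases v != t.getD k 0 + ((j : Int) - k) <;>
            cases v != t.getD k 0 - ((j : Int) - k) <;> rfl)
lemma pvMemSet (t : List Int) (j : Nat) (v : Int) :
    ∀ (l : List Nat) (s : PySem.Set Int),
      (v ∈ l.foldl (fun s (i : Nat) =>
          PySem.Set.add (PySem.Set.add (PySem.Set.add s (PySem.List.pyGetD t (i : Int) 0))
            (PySem.List.pyGetD t (i : Int) 0 + ((j : Int) - (i : Int))))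
            (PySem.List.pyGetD t (i : Int) 0 - ((j : Int) - (i : Int)))) s
        ↔ v ∈ s ∨ ∃ i ∈ l, (v = t.getD i 0 ∨ v = t.getD i 0 + ((j : Int) - i) ∨
            v = t.getD i 0 - ((j : Int) - i))) := by
  intro l
  induction l with
  | nil => intro s; simp
  | cons a l ih =>
    intro s
    rw [List.foldl_cons, ih]
    simp only [PySem.Set.mem_add, PySem.List.pyGetD_natCast, List.mem_cons]
    constructor
    · rintro (((hs | h) | h) | h)
      · rcases hs with hs | h
        · exact Or.inl hs
        · exact Or.inr ⟨a, Or.inl rfl, Or.inl h⟩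
      · exact Or.inr ⟨a, Or.inl rfl, Or.inr (Or.inl h)⟩
      · exact Or.inr ⟨a, Or.inl rfl, Or.inr (Or.inr h)⟩
      · rcases h with ⟨i, hi, htri⟩
        exact Or.inr ⟨i, Or.inr hi, htri⟩
    · rintro (hs | ⟨i, (rfl | hi), htri⟩)
      · exact Or.inl (Or.inl (Or.inl (Or.inl hs)))
      · rcases htri with h | h | h
        · exact Or.inl (Or.inl (Or.inl (Or.inr h)))
        · exact Or.inl (Or.inl (Or.inr h))
        · exact Or.inl (Or.inr h)
      · exact Or.inr ⟨i, hi, htri⟩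

lemma pvFinal (t : List Int) (j : Nat) (hj : j < t.length) (v : Int)
    (h1 : 1 ≤ v) (h2 : v ≤ (t.length : Int)) (S : PySem.Set Int)
    (hS : ∀ x : Int, x ∈ S ↔ ∃ i, i < j ∧ (x = t.getD i 0 ∨ x = t.getD i 0 + ((j : Int) - i) ∨
      x = t.getD i 0 - ((j : Int) - i))) :
    pvAll t t.length j v = !(PySem.Set.contains S v) := by
  cases hc : PySem.Set.contains S v with
  | true =>
    obtain ⟨i, hij, htri⟩ := (hS v).1 ((PySem.Set.contains_iff S v).1 hc)
    simp only [Bool.not_true]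
    refine List.all_eq_false.2 ⟨i, List.mem_range.2 (by omega), ?_⟩
    unfold pvOK
    rcases htri with h | h | h
    · subst h
      rw [if_pos (by omega : i + 1 ≤ j)]
      simp
    · subst h
      rw [if_pos (⟨by omega, hj, by omega⟩ :
        i + 1 ≤ j ∧ j < t.length ∧ t.getD i 0 + ((j : Int) - i) ≤ (t.length : Int))]
      simp
    · subst h
      rw [if_pos (⟨by omega, hj, by omega⟩ :
        i + 1 ≤ j ∧ j < t.length ∧ 0 ≤ t.getD i 0 - ((j : Int) - i))]
      simp
  | false =>
    have hnotin : v ∉ S := fun h => by simp at hc; exact hc h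
    simp only [Bool.not_false]
    refine List.all_eq_true.2 ?_
    intro i hi
    unfold pvOK
    simp only [Bool.and_eq_true]
    refine ⟨?_, ?_, ?_⟩
    · split
      · next g =>
        rw [bne_iff_ne]
        intro he
        exact hnotin ((hS v).2 ⟨i, by omega, Or.inl he⟩)
      · rfl
    · split
      · next g =>
        rw [bne_iff_ne]
        intro he
        exact hnotin ((hS v).2 ⟨i, by omega, Or.inr (Or.inl he)⟩)
      · rfl
    · split
      · next g =>
        rw [bne_iff_ne]
        intro he
        exact hnotin ((hS v).2 ⟨i, by omega, Or.inr (Or.inr he)⟩)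
      · rfl

-- ===== VERDICT (by name: the statement is the Claim_ definition above) =====
theorem generarPosiciones_spec : Claim_equal_generarPosiciones := by
  intro t _
  unfold Spec_generarPosiciones
  simp only [generarPosiciones, generarPosiciones_alt]
  rw [if_neg (fun h => by
    rcases List.mem_map.1 h with ⟨j, hjr, hb⟩
    have hl := congrArg List.length hb
    rw [PySem.List.length_pyRange_one] at hl
    have := List.mem_range.1 hjr
    simp only [List.length_nil] at hl
    omega)]
  have hinit : (List.range t.length).map
      (fun _ => PySem.List.pyRange 1 ((t.length : Int) + 1) 1) =
      pvConc t.length (fun _ _ => true) := by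
    unfold pvConc pvBase
    simp
  rw [hinit, pvOuter t t.length (le_refl _)]
  unfold pvConc
  refine List.map_congr_left ?_
  intro j hjmem
  have hj : j < t.length := List.mem_range.1 hjmem
  refine List.filter_congr ?_
  intro v hv
  rcases PySem.List.mem_pyRange_one.1 hv with ⟨hv1, hv2⟩
  refine pvFinal t j hj v hv1 (by omega) _ ?_
  intro x
  rw [pvMemSet t j x (List.range j) PySem.Set.empty]
  simp [PySem.Set.empty, List.mem_range]
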